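-- pv_equiv track=rewrite | github.com/tranlehoangphuczp-hub/Python | PY01066 - XÂU “THĂNG BẰNG”.py | solve
-- ===== SOURCE A (Python) =====
-- def solve(s):
--     z = s[::-1]
--     a = []
--     for i in range(len(s)-1):
--         a.append(abs(ord(s[i])-ord(s[i+1])))
--     for i in range(len(z)-1):
--         if abs(ord(z[i])-ord(z[i+1])) != a[i]:
--             return "NO"
--     return "YES"
-- ===== SOURCE B (Python) =====
-- def solve(s):
--     lo, hi = 0, len(s) - 1
--     while lo + 1 < hi:
--         if abs(ord(s[lo]) - ord(s[lo + 1])) != abs(ord(s[hi]) - ord(s[hi - 1])):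
--             return "NO"
--         lo += 1
--         hi -= 1
--     return "YES"
-- ===== Notes on version B (the rewrite author's own statement) =====
-- stated objective: alternative
-- what changed: B drops the reversed copy and the materialised diff array: it walks two pointers inward over s itself, comparing the adjacent difference at the front with the mirrored one at the back and stopping at the first mismatch.
import Mathlib
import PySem

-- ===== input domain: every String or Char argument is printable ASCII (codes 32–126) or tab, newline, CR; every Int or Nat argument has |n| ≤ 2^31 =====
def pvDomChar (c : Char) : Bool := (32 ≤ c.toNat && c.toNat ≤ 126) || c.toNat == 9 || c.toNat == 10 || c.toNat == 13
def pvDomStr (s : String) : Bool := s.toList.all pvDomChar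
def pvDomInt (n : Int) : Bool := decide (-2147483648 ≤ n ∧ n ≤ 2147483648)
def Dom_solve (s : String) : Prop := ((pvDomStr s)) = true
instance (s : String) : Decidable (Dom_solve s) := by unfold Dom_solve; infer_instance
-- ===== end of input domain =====

-- B replaces A's reversed copy + materialised diff array by an in-place two-pointer
-- scan over s; same return value, O(1) extra space (objective: alternative).

-- abs(ord x - ord y), shared by both ports
def pvAD (x y : Char) : Nat := ((x.toNat : Int) - (y.toNat : Int)).natAbs

-- ===== PORT A =====
-- second loop of A: early return "NO" on mismatch
def solveCheck (z : List Char) (a : List Int) : List Int → String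
  | [] => "YES"
  | i :: rest =>
      if (pvAD (PySem.List.pyGetD z i ' ') (PySem.List.pyGetD z (i + 1) ' ') : Int)
          ≠ PySem.List.pyGetD a i 0 then "NO"
      else solveCheck z a rest

def solve (s : String) : String :=
  let ls := s.toList
  let z := (PySem.List.slice? ls none none (-1)).getD []   -- s[::-1]
  let a := (PySem.List.pyRange 0 ((ls.length : Int) - 1) 1).foldl
      (fun acc i =>
        acc ++ [(pvAD (PySem.List.pyGetD ls i ' ') (PySem.List.pyGetD ls (i + 1) ' ') : Int)]) []
  solveCheck z a (PySem.List.pyRange 0 ((z.length : Int) - 1) 1)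

-- ===== PORT B =====
def altLoop (l : List Char) (lo hi : Int) : String :=
  if _h : lo + 1 < hi then
    if pvAD (PySem.List.pyGetD l lo ' ') (PySem.List.pyGetD l (lo + 1) ' ')
        ≠ pvAD (PySem.List.pyGetD l hi ' ') (PySem.List.pyGetD l (hi - 1) ' ')
    then "NO"
    else altLoop l (lo + 1) (hi - 1)
  else "YES"
termination_by (hi - lo).toNat
decreasing_by omega

def solve_alt (s : String) : String := altLoop s.toList 0 ((s.toList.length : Int) - 1)

-- ===== PRECONDITION & SPEC =====
def Spec_solve (s : String) (out : String) : Prop := out = solve_alt s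
instance (s : String) (out : String) : Decidable (Spec_solve s out) := by unfold Spec_solve; infer_instance

-- ===== CLAIM (what is proved, stated in full; the proofs are below) =====
def Claim_equal_solve : Prop := ∀ (s : String), Dom_solve s → Spec_solve s (solve s)

-- ===== LEMMAS AND PROOFS =====

-- the adjacent difference at Int index i
def pvD (l : List Char) (i : Int) : Nat :=
  pvAD (PySem.List.pyGetD l i ' ') (PySem.List.pyGetD l (i + 1) ' ')

lemma pvAD_comm (x y : Char) : pvAD x y = pvAD y x := by
  simp only [pvAD]; omega

lemma solveCheck_cases (z : List Char) (a : List Int) (is : List Int) :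
    solveCheck z a is = "YES" ∨ solveCheck z a is = "NO" := by
  induction is with
  | nil => left; rfl
  | cons i rest ih =>
      simp only [solveCheck]
      split_ifs
      · right; rfl
      · exact ih

lemma solveCheck_yes (z : List Char) (a : List Int) (is : List Int) :
    solveCheck z a is = "YES" ↔
      ∀ i ∈ is, (pvAD (PySem.List.pyGetD z i ' ') (PySem.List.pyGetD z (i + 1) ' ') : Int)
        = PySem.List.pyGetD a i 0 := by
  induction is with
  | nil => simp [solveCheck]
  | cons i rest ih =>
      simp only [solveCheck]
      split_ifs with h
      · constructor
        · intro hc; exact absurd hc (by decide)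
        · intro hall; exact absurd (hall i (by simp)) h
      · rw [ne_eq, not_not] at h
        rw [ih]
        constructor
        · intro hall j hj
          rcases List.mem_cons.mp hj with rfl | hj
          · exact h
          · exact hall j hj
        · intro hall j hj; exact hall j (List.mem_cons_of_mem _ hj)

lemma altLoop_cases (l : List Char) (lo hi : Int) :
    altLoop l lo hi = "YES" ∨ altLoop l lo hi = "NO" := by
  rw [altLoop]
  split_ifs
  · right; rfl
  · exact altLoop_cases l (lo + 1) (hi - 1)
  · left; rfl
termination_by (hi - lo).toNat
decreasing_by omega

lemma altLoop_yes (l : List Char) (lo hi : Int) :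
    altLoop l lo hi = "YES" ↔
      ∀ k : Nat, lo + k + 1 < hi - k → pvD l (lo + k) = pvD l (hi - k - 1) := by
  rw [altLoop]
  split_ifs with h1 h2
  · -- mismatch at (lo, hi): result "NO"
    constructor
    · intro hc; exact absurd hc (by decide)
    · intro hall
      exfalso
      apply h2
      have h0 := hall 0 (by omega)
      simp only [Int.natCast_zero, add_zero, sub_zero] at h0
      rw [pvD, pvD, sub_add_cancel] at h0
      rw [h0, pvAD_comm]
  · rw [ne_eq, not_not] at h2
    rw [altLoop_yes l (lo + 1) (hi - 1)]
    constructor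
    · intro hall k hk
      cases k with
      | zero =>
          simp only [Int.natCast_zero, add_zero, sub_zero]
          rw [pvD, pvD, sub_add_cancel, h2, pvAD_comm]
      | succ k =>
          have := hall k (by push_cast at hk ⊢; omega)
          rw [show lo + (↑(k + 1) : Int) = lo + 1 + k by push_cast; ring,
              show hi - (↑(k + 1) : Int) - 1 = hi - 1 - k - 1 by push_cast; ring]
          exact this
    · intro hall k hk
      have := hall (k + 1) (by push_cast at hk ⊢; omega)
      rw [show lo + 1 + (k : Int) = lo + ↑(k + 1) by push_cast; ring,
          show hi - 1 - (k : Int) - 1 = hi - ↑(k + 1) - 1 by push_cast; ring]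
      exact this
  · -- loop never entered
    constructor
    · intro _ k hk; omega
    · intro _; rfl
termination_by (hi - lo).toNat
decreasing_by omega

lemma pyGetD_rev (l : List Char) (i : Int) (h0 : 0 ≤ i) (h1 : i < (l.length : Int)) :
    PySem.List.pyGetD l.reverse i ' ' = PySem.List.pyGetD l ((l.length : Int) - 1 - i) ' ' := by
  rw [show i = ((i.toNat : Nat) : Int) by omega,
      show (l.length : Int) - 1 - ((i.toNat : Nat) : Int) = ((l.length - 1 - i.toNat : Nat) : Int) by omega,
      PySem.List.pyGetD_natCast, PySem.List.pyGetD_natCast,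
      List.getD_eq_getElem?_getD, List.getD_eq_getElem?_getD,
      List.getElem?_reverse (by omega)]

lemma rev_diff (l : List Char) (i : Int) (h0 : 0 ≤ i) (h1 : i < (l.length : Int) - 1) :
    pvAD (PySem.List.pyGetD l.reverse i ' ') (PySem.List.pyGetD l.reverse (i + 1) ' ')
      = pvD l ((l.length : Int) - 2 - i) := by
  rw [pyGetD_rev l i h0 (by omega), pyGetD_rev l (i + 1) (by omega) (by omega), pvAD_comm, pvD,
      show (l.length : Int) - 1 - (i + 1) = (l.length : Int) - 2 - i by ring,
      show (l.length : Int) - 1 - i = (l.length : Int) - 2 - i + 1 by ring]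

lemma diff_arr (l : List Char) (i : Int) (h0 : 0 ≤ i) (h1 : i < (l.length : Int) - 1) :
    PySem.List.pyGetD ((PySem.List.pyRange 0 ((l.length : Int) - 1) 1).map
        (fun j => (pvAD (PySem.List.pyGetD l j ' ') (PySem.List.pyGetD l (j + 1) ' ') : Int))) i 0
      = (pvD l i : Int) := by
  rw [PySem.List.pyGetD_map_pyRange_of_nonneg _ _ _ _ h0 h1]
  rfl

lemma solve_yes (s : String) :
    solve s = "YES" ↔
      ∀ i : Int, 0 ≤ i → i < (s.toList.length : Int) - 1 →
        pvD s.toList ((s.toList.length : Int) - 2 - i) = pvD s.toList i := by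
  rw [solve]
  simp only [PySem.List.slice?_none_none_neg_one, Option.getD_some,
    PySem.List.foldl_append_singleton_eq_map, List.nil_append, List.length_reverse]
  rw [solveCheck_yes]
  constructor
  · intro hall i h0 h1
    have hi := hall i (by rw [PySem.List.mem_pyRange_one]; omega)
    rw [diff_arr s.toList i h0 h1, rev_diff s.toList i h0 h1] at hi
    exact_mod_cast hi
  · intro hall i hi
    rw [PySem.List.mem_pyRange_one] at hi
    obtain ⟨h0, h1⟩ := hi
    rw [diff_arr s.toList i h0 h1, rev_diff s.toList i h0 h1]
    exact_mod_cast hall i h0 h1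

lemma solve_alt_yes (s : String) :
    solve_alt s = "YES" ↔
      ∀ k : Nat, (k : Int) + 1 < (s.toList.length : Int) - 1 - k →
        pvD s.toList k = pvD s.toList ((s.toList.length : Int) - 2 - k) := by
  rw [solve_alt, altLoop_yes]
  constructor
  · intro h k hk
    have := h k (by omega)
    rw [show (0 : Int) + k = (k : Int) by ring,
        show (s.toList.length : Int) - 1 - k - 1 = (s.toList.length : Int) - 2 - k by ring] at this
    exact this
  · intro h k hk
    have := h k (by omega)
    rw [show (0 : Int) + k = (k : Int) by ring,
        show (s.toList.length : Int) - 1 - k - 1 = (s.toList.length : Int) - 2 - k by ring]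
    exact this

lemma conds_iff (l : List Char) :
    (∀ i : Int, 0 ≤ i → i < (l.length : Int) - 1 →
        pvD l ((l.length : Int) - 2 - i) = pvD l i) ↔
    (∀ k : Nat, (k : Int) + 1 < (l.length : Int) - 1 - k →
        pvD l k = pvD l ((l.length : Int) - 2 - k)) := by
  constructor
  · intro h k hk
    exact (h k (by omega) (by omega)).symm
  · intro h i h0 h1
    set n := (l.length : Int)
    rcases lt_trichotomy (2 * i) (n - 2) with hc | hc | hc
    · have := h i.toNat (by omega)
      rw [show ((i.toNat : Int)) = i by omega] at this
      exact this.symm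
    · have : n - 2 - i = i := by omega
      rw [this]
    · have := h (n - 2 - i).toNat (by omega)
      rw [show (((n - 2 - i).toNat : Int)) = n - 2 - i by omega,
          show n - 2 - (n - 2 - i) = i by omega] at this
      exact this

lemma solve_alt_cases (s : String) : solve_alt s = "YES" ∨ solve_alt s = "NO" := by
  rw [solve_alt]; exact altLoop_cases _ _ _

lemma solve_cases (s : String) : solve s = "YES" ∨ solve s = "NO" := by
  rw [solve]; exact solveCheck_cases _ _ _

-- ===== VERDICT (by name: the statement is the Claim_ definition above) =====
theorem solve_spec : Claim_equal_solve := by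
  intro s _
  unfold Spec_solve
  have hiff : solve s = "YES" ↔ solve_alt s = "YES" := by
    rw [solve_yes, solve_alt_yes]
    exact conds_iff s.toList
  rcases solve_cases s with h | h <;> rcases solve_alt_cases s with h' | h'
  · rw [h, h']
  · rw [h] at hiff; rw [h'] at hiff
    exact absurd (hiff.mp rfl) (by decide)
  · rw [h] at hiff; rw [h'] at hiff
    exact absurd (hiff.mpr rfl) (by decide)
  · rw [h, h']
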